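-- pv_equiv track=rewrite | github.com/csabaistrab/Szkriptnyelvek | 5/307b.py | is_passphrase
-- ===== SOURCE A (Python) =====
-- def is_passphrase(passphrase):
--     passphrase = passphrase.split()
--     dict_passphrase = {}
--     for s in passphrase:
--         if s in dict_passphrase:
--             dict_passphrase[s] += 1
--         else:
--             dict_passphrase[s] = 1
--     for i in dict_passphrase.values():
--         if i != 1:
--             return False
--             break
--     return True
-- ===== SOURCE B (Python) =====
-- def is_passphrase(passphrase):
--     words = sorted(passphrase.split())
--     return all(a != b for a, b in zip(words, words[1:]))
-- ===== Notes on version B (the rewrite author's own statement) =====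
-- stated objective: alternative
-- what changed: Replaces A's hash-counting (build a count dict, then scan its values) by sort-then-adjacent-scan: sort the words so any duplicates become neighbours, then check all adjacent pairs differ; no dictionary or counting at all.
import Mathlib
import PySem

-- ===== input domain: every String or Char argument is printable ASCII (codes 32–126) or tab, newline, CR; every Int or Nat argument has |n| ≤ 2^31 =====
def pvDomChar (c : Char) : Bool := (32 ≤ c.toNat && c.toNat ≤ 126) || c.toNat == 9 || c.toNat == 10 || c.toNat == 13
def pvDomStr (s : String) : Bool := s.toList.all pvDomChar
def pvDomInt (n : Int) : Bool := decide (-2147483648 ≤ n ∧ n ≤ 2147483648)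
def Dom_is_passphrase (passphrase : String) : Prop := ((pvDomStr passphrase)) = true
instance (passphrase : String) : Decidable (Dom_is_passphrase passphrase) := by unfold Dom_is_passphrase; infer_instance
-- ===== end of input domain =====

-- B replaces A's count dictionary + values-scan by sort-then-adjacent-scan (alternative algorithm, no hashing).

-- ===== PORT A =====
-- the second loop: 'for i in values: if i != 1: return False' then 'return True'
def pvValuesLoop : List Int → Bool
  | [] => true
  | i :: rest => if i ≠ 1 then false else pvValuesLoop rest

def is_passphrase (passphrase : String) : Bool :=
  let ws := PySem.Str.split₀ passphrase
  let d := ws.foldl (fun d s =>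
      if d.contains s then d.modify s 0 (· + 1) else d.insert s (1 : Int))
    PySem.Dict.empty
  pvValuesLoop d.values

-- ===== PORT B =====
def is_passphrase_alt (passphrase : String) : Bool :=
  let words := PySem.List.sorted (PySem.Str.split₀ passphrase) (fun x => x) false
  (words.zip (PySem.List.slice words (some 1) none)).all (fun p => p.1 != p.2)

-- ===== PRECONDITION & SPEC =====
def Spec_is_passphrase (passphrase : String) (out : Bool) : Prop := out = is_passphrase_alt passphrase
instance (passphrase : String) (out : Bool) : Decidable (Spec_is_passphrase passphrase out) := by unfold Spec_is_passphrase; infer_instance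

-- ===== CLAIM (what is proved, stated in full; the proofs are below) =====
def Claim_equal_is_passphrase : Prop := ∀ (passphrase : String), Dom_is_passphrase passphrase → Spec_is_passphrase passphrase (is_passphrase passphrase)

-- ===== LEMMAS AND PROOFS =====

-- A's branching update is exactly the Counter update: on a missing key, modify with default 0 is insert 1.
theorem pvStep_eq_counter_step (d : PySem.Dict String Int) (s : String) :
    (if d.contains s then d.modify s 0 (· + 1) else d.insert s (1 : Int))
      = d.modify s 0 (· + 1) := by
  by_cases h : d.contains s = true
  · simp [h]
  · simp only [h, if_neg Bool.false_ne_true]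
    simp [PySem.Dict.modify, PySem.Dict.getD_of_not_contains d 0 (Bool.eq_false_iff.mpr h)]

theorem pvFold_eq_counter (ws : List String) :
    ws.foldl (fun d s =>
        if d.contains s then d.modify s 0 (· + 1) else d.insert s (1 : Int))
      PySem.Dict.empty = PySem.Dict.counter ws := by
  rw [PySem.Dict.counter_eq_foldl]
  congr 1
  funext d s
  exact pvStep_eq_counter_step d s

theorem pvValuesLoop_eq_all (l : List Int) : pvValuesLoop l = l.all (· == 1) := by
  induction l with
  | nil => rfl
  | cons i rest ih =>
    by_cases h : i = 1 <;> simp [pvValuesLoop, h, ih]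

-- A's result is the duplicate-freeness of the word list.
theorem pvA_eq_nodup (ws : List String) :
    pvValuesLoop (PySem.Dict.counter ws).values = decide ws.Nodup := by
  rw [PySem.Dict.values_eq_map_keys _ (PySem.Dict.nodup_keys_counter ws) 0,
      pvValuesLoop_eq_all]
  by_cases h : ws.Nodup
  · simp only [h, decide_true]
    rw [List.all_eq_true]
    intro x hx
    obtain ⟨k, hk, rfl⟩ := List.mem_map.mp hx
    rw [PySem.Dict.keys_counter] at hk
    have hk' : k ∈ ws := (PySem.Set.mem_ofList ws k).mp hk
    simp [PySem.Dict.getD_counter, List.count_eq_one_of_mem h hk']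
  · simp only [h, decide_false]
    rw [List.all_eq_false]
    have : ∃ k ∈ ws, 1 < ws.count k := by
      by_contra hc
      push_neg at hc
      exact h (List.nodup_iff_count_le_one.mpr fun a => by
        by_cases ha : a ∈ ws
        · exact hc a ha
        · simp [List.count_eq_zero_of_not_mem ha])
    obtain ⟨k, hk, hgt⟩ := this
    refine ⟨(PySem.Dict.counter ws).getD k 0, List.mem_map.mpr ⟨k, ?_, rfl⟩, ?_⟩
    · rw [PySem.Dict.keys_counter]; exact (PySem.Set.mem_ofList ws k).mpr hk
    · rw [PySem.Dict.getD_counter]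
      simp only [beq_iff_eq]
      omega

-- the adjacent-pair scan over zip(l, l[1:]) is IsChain (· ≠ ·)
theorem pvZipAll_eq_chain (l : List String) :
    ((l.zip l.tail).all (fun p => p.1 != p.2) = true) ↔ l.IsChain (· ≠ ·) := by
  induction l with
  | nil => simp
  | cons a t ih =>
    cases t with
    | nil => simp
    | cons b t' =>
      simp only [List.tail_cons, List.zip_cons_cons, List.all_cons,
        Bool.and_eq_true, bne_iff_ne, List.isChain_cons_cons] at *
      exact and_congr Iff.rfl ih

-- on a (≤)-sorted list, adjacent-distinct is exactly Nodup
theorem pvChain_iff_nodup (l : List String) (hs : l.Pairwise (· ≤ ·)) :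
    l.IsChain (· ≠ ·) ↔ l.Nodup := by
  induction l with
  | nil => simp
  | cons a t ih =>
    have hle : ∀ x ∈ t, a ≤ x := (List.pairwise_cons.mp hs).1
    have hpt : t.Pairwise (· ≤ ·) := (List.pairwise_cons.mp hs).2
    cases t with
    | nil => simp
    | cons h t' =>
      rw [List.isChain_cons_cons, ih hpt]
      constructor
      · rintro ⟨hah, hnd⟩
        rw [List.nodup_cons]
        refine ⟨?_, hnd⟩
        intro hmem
        have hha : h ≤ a := by
          rcases List.mem_cons.mp hmem with rfl | hmem'
          · exact le_refl a
          · exact (List.pairwise_cons.mp hpt).1 a hmem'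
        exact hah (le_antisymm (hle h List.mem_cons_self) hha)
      · intro hnd
        rw [List.nodup_cons] at hnd
        exact ⟨fun he => hnd.1 (he ▸ List.mem_cons_self), hnd.2⟩

-- B's result is also the duplicate-freeness of the word list.
theorem pvB_eq_nodup (ws : List String) :
    (let words := PySem.List.sorted ws (fun x => x) false
     (words.zip (PySem.List.slice words (some 1) none)).all (fun p => p.1 != p.2))
      = decide ws.Nodup := by
  have hperm := PySem.List.sorted_perm ws (fun x => x) false
  have hs : (PySem.List.sorted ws (fun x => x) false).Pairwise (· ≤ ·) := by
    have := PySem.List.sorted_pairwise ws (fun x => x)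
    exact this
  simp only [PySem.List.slice_from_one]
  rw [Bool.eq_iff_iff, decide_eq_true_iff, pvZipAll_eq_chain,
      pvChain_iff_nodup _ hs]
  exact hperm.nodup_iff

-- ===== VERDICT (by name: the statement is the Claim_ definition above) =====
theorem is_passphrase_spec : Claim_equal_is_passphrase := by
  intro passphrase _
  unfold Spec_is_passphrase is_passphrase is_passphrase_alt
  simp only [pvFold_eq_counter]
  rw [pvA_eq_nodup, ← pvB_eq_nodup]
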